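-- pv_equiv track=rewrite | github.com/Neffats/TCP-Bounce | file_handler.py | decode_chunk
-- ===== SOURCE A (Python) =====
-- CHUNK_SZ = 4
--
-- MASKS = [0xFF000000, 0x00FF0000, 0x0000FF00, 0x000000FF]
--
-- def decode_chunk(encoded):
-- 	message_chunk = []
-- 	for i in range(CHUNK_SZ):
-- 		temp = encoded & MASKS[i]
-- 		shiftby = ((CHUNK_SZ-1)-i)*8
-- 		message_chunk.append(temp >> shiftby)
--
-- 	message_string = []
--
-- 	[message_string.append(chr(x)) for x in message_chunk]
-- 	return "".join(message_string)
-- ===== SOURCE B (Python) =====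
-- def decode_chunk(encoded):
--     return (encoded & 0xFFFFFFFF).to_bytes(4, 'big').decode('latin-1')
-- ===== Notes on version B (the rewrite author's own statement) =====
-- stated objective: idiomatic
-- what changed: Replaced the mask table, extraction loop and per-byte chr/join with a single masked to_bytes(4,'big') conversion decoded as latin-1.
import Mathlib
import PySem

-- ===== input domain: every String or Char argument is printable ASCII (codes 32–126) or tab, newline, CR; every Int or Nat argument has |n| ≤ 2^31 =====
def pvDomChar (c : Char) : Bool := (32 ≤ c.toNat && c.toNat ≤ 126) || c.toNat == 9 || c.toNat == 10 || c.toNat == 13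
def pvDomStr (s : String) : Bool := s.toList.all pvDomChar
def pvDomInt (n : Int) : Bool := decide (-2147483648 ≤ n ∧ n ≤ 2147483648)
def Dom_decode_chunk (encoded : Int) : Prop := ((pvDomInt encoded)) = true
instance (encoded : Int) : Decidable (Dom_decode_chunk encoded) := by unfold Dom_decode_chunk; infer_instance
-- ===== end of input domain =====

-- B replaces A's mask table and extraction loop by one masked big-endian 4-byte conversion (idiomatic, same cost).


-- ===== PORT A =====
def CHUNK_SZ : Int := 4

def MASKS : List Int := [0xFF000000, 0x00FF0000, 0x0000FF00, 0x000000FF]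

-- literal port of A's loop: MASKS[i] is always in range here so pyGetD's default 0 is never used;
-- shiftby is ≥ 0 for every i in range(4), so '.toNat' on it is exact; chr(x) with 0 ≤ x ≤ 255 is Char.ofNat x.toNat
def decode_chunk (encoded : Int) : String :=
  let message_chunk : List Int :=
    (PySem.List.pyRange 0 CHUNK_SZ 1).foldl (fun acc i =>
      let temp := PySem.Int.band encoded (PySem.List.pyGetD MASKS i 0)
      let shiftby := ((CHUNK_SZ - 1) - i) * 8
      acc ++ [temp >>> shiftby.toNat]) []
  let message_string : List Char :=
    message_chunk.foldl (fun acc x => acc ++ [Char.ofNat x.toNat]) []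
  String.ofList message_string

-- ===== PORT B =====
-- port of Source B: n = encoded & 0xFFFFFFFF (nonnegative), to_bytes(4,'big') yields the four
-- big-endian bytes of n, decode('latin-1') maps each byte value to the Char with that code
def decode_chunk_alt (encoded : Int) : String :=
  let n : Nat := (PySem.Int.band encoded 0xFFFFFFFF).toNat
  String.ofList [Char.ofNat (n / 16777216 % 256), Char.ofNat (n / 65536 % 256),
             Char.ofNat (n / 256 % 256), Char.ofNat (n % 256)]

-- ===== PRECONDITION & SPEC =====
def Spec_decode_chunk (encoded : Int) (out : String) : Prop := out = decode_chunk_alt encoded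
instance (encoded : Int) (out : String) : Decidable (Spec_decode_chunk encoded out) := by unfold Spec_decode_chunk; infer_instance

-- ===== CLAIM (what is proved, stated in full; the proofs are below) =====
def Claim_equal_decode_chunk : Prop := ∀ (encoded : Int), Dom_decode_chunk encoded → Spec_decode_chunk encoded (decode_chunk encoded)

-- ===== LEMMAS AND PROOFS =====

-- k AND the byte mask 255·2^s extracts byte s/8: k &&& (255 <<< s) = (k >>> s % 256) <<< s
theorem pv_and_byte_mask (k s : Nat) : k &&& (255 <<< s) = (k >>> s % 256) <<< s := by
  have hmod : (k &&& (255 <<< s)) % 2 ^ s = 0 := by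
    have h1 : (k &&& (255 <<< s)) % 2 ^ s = (k &&& (255 <<< s)) &&& (2 ^ s - 1) :=
      (Nat.and_two_pow_sub_one_eq_mod _ s).symm
    have h2 : (255 <<< s) &&& (2 ^ s - 1) = 0 := by
      rw [Nat.and_two_pow_sub_one_eq_mod, Nat.shiftLeft_eq, Nat.mul_mod_left]
    rw [h1, Nat.and_assoc, h2, Nat.and_zero]
  have hshift : (k &&& (255 <<< s)) >>> s = k >>> s % 256 := by
    rw [Nat.shiftRight_and_distrib]
    have h3 : (255 <<< s) >>> s = 255 := by
      rw [Nat.shiftLeft_eq, Nat.shiftRight_eq_div_pow,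
        Nat.mul_div_assoc _ (dvd_refl _), Nat.div_self (Nat.two_pow_pos s), Nat.mul_one]
    rw [h3, Nat.and_two_pow_sub_one_eq_mod (k >>> s) 8]
  have hdecomp := Nat.div_add_mod (k &&& (255 <<< s)) (2 ^ s)
  rw [hmod, Nat.add_zero] at hdecomp
  calc k &&& (255 <<< s) = 2 ^ s * ((k &&& (255 <<< s)) / 2 ^ s) := hdecomp.symm
    _ = 2 ^ s * ((k &&& (255 <<< s)) >>> s) := by rw [Nat.shiftRight_eq_div_pow]
    _ = 2 ^ s * (k >>> s % 256) := by rw [hshift]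
    _ = (k >>> s % 256) <<< s := by rw [Nat.shiftLeft_eq, Nat.mul_comm]

-- folding chr over a four-element list, evaluated once on variables
theorem pv_fold_chr (x0 x1 x2 x3 : Int) :
    List.foldl (fun acc x => acc ++ [Char.ofNat x.toNat]) ([] : List Char)
      ([x0] ++ [x1] ++ [x2] ++ [x3]) =
      [Char.ofNat x0.toNat, Char.ofNat x1.toNat, Char.ofNat x2.toNat, Char.ofNat x3.toNat] := rfl

set_option maxHeartbeats 1000000 in
-- nonnegative inputs: Python's & is Nat &&& on both sides
theorem pv_decode_pos (k : Nat) (hkk : k ≤ 2147483648) :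
    decode_chunk (k : Int) = decode_chunk_alt (k : Int) := by
  unfold decode_chunk decode_chunk_alt
  simp only [CHUNK_SZ]
  rw [show (PySem.List.pyRange 0 4 1) = [0, 1, 2, 3] from by decide]
  simp only [List.foldl, List.nil_append,
    show PySem.List.pyGetD MASKS 0 0 = 0xFF000000 from by decide,
    show PySem.List.pyGetD MASKS 1 0 = 0x00FF0000 from by decide,
    show PySem.List.pyGetD MASKS 2 0 = 0x0000FF00 from by decide,
    show PySem.List.pyGetD MASKS 3 0 = 0x000000FF from by decide,
    show ((((4 : Int) - 1) - 0) * 8).toNat = 24 from by decide,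
    show ((((4 : Int) - 1) - 1) * 8).toNat = 16 from by decide,
    show ((((4 : Int) - 1) - 2) * 8).toNat = 8 from by decide,
    show ((((4 : Int) - 1) - 3) * 8).toNat = 0 from by decide]
  have hb : ∀ m : Int, 0 ≤ m → PySem.Int.band (k : Int) m = ((k &&& m.toNat : Nat) : Int) :=
    fun m hm => PySem.Int.band_of_nonneg (Int.natCast_nonneg k) hm
  have h24 : k &&& 4278190080 = (k >>> 24 % 256) <<< 24 := by
    rw [show (4278190080 : Nat) = 255 <<< 24 by norm_num [Nat.shiftLeft_eq]]
    exact pv_and_byte_mask k 24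
  have h16 : k &&& 16711680 = (k >>> 16 % 256) <<< 16 := by
    rw [show (16711680 : Nat) = 255 <<< 16 by norm_num [Nat.shiftLeft_eq]]
    exact pv_and_byte_mask k 16
  have h8 : k &&& 65280 = (k >>> 8 % 256) <<< 8 := by
    rw [show (65280 : Nat) = 255 <<< 8 by norm_num [Nat.shiftLeft_eq]]
    exact pv_and_byte_mask k 8
  have h255 : k &&& 255 = k % 256 := Nat.and_two_pow_sub_one_eq_mod k 8
  have h32 : k &&& 4294967295 = k % 4294967296 := Nat.and_two_pow_sub_one_eq_mod k 32
  simp only [hb 0xFF000000 (by norm_num), hb 0x00FF0000 (by norm_num),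
    hb 0x0000FF00 (by norm_num), hb 0x000000FF (by norm_num), hb 0xFFFFFFFF (by norm_num),
    show Int.toNat 4278190080 = 4278190080 from rfl,
    show Int.toNat 16711680 = 16711680 from rfl, show Int.toNat 65280 = 65280 from rfl,
    show Int.toNat 255 = 255 from rfl, show Int.toNat 4294967295 = 4294967295 from rfl,
    h24, h16, h8, h255, h32, ← Int.natCast_shiftRight, Int.toNat_natCast,
    Nat.shiftLeft_eq, Nat.shiftRight_eq_div_pow]
  clear hb h24 h16 h8 h255 h32
  congr 1
  rw [pv_fold_chr]
  refine congrArg₂ List.cons ?_ (congrArg₂ List.cons ?_ (congrArg₂ List.cons ?_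
    (congrArg₂ List.cons ?_ rfl))) <;> exact congrArg Char.ofNat (by omega)

set_option maxHeartbeats 1000000 in
-- negative inputs: Python's & on a negative left operand, via the complement k = -encoded-1
theorem pv_decode_neg (k : Nat) (hkk : k ≤ 2147483647) :
    decode_chunk (-((k : Int) + 1)) = decode_chunk_alt (-((k : Int) + 1)) := by
  unfold decode_chunk decode_chunk_alt
  simp only [CHUNK_SZ]
  rw [show (PySem.List.pyRange 0 4 1) = [0, 1, 2, 3] from by decide]
  simp only [List.foldl, List.nil_append,
    show PySem.List.pyGetD MASKS 0 0 = 0xFF000000 from by decide,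
    show PySem.List.pyGetD MASKS 1 0 = 0x00FF0000 from by decide,
    show PySem.List.pyGetD MASKS 2 0 = 0x0000FF00 from by decide,
    show PySem.List.pyGetD MASKS 3 0 = 0x000000FF from by decide,
    show ((((4 : Int) - 1) - 0) * 8).toNat = 24 from by decide,
    show ((((4 : Int) - 1) - 1) * 8).toNat = 16 from by decide,
    show ((((4 : Int) - 1) - 2) * 8).toNat = 8 from by decide,
    show ((((4 : Int) - 1) - 3) * 8).toNat = 0 from by decide]
  have hb : ∀ m : Int, 0 ≤ m →
      PySem.Int.band (-((k : Int) + 1)) m = ((m.toNat - (m.toNat &&& k) : Nat) : Int) := by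
    intro m hm
    unfold PySem.Int.band
    rw [if_neg (by omega), if_pos hm, show (-(-((k : Int) + 1)) - 1).toNat = k by omega]
  have h24 : (4278190080 : Nat) &&& k = (k >>> 24 % 256) <<< 24 := by
    rw [show (4278190080 : Nat) = 255 <<< 24 by norm_num [Nat.shiftLeft_eq], Nat.and_comm]
    exact pv_and_byte_mask k 24
  have h16 : (16711680 : Nat) &&& k = (k >>> 16 % 256) <<< 16 := by
    rw [show (16711680 : Nat) = 255 <<< 16 by norm_num [Nat.shiftLeft_eq], Nat.and_comm]
    exact pv_and_byte_mask k 16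
  have h8 : (65280 : Nat) &&& k = (k >>> 8 % 256) <<< 8 := by
    rw [show (65280 : Nat) = 255 <<< 8 by norm_num [Nat.shiftLeft_eq], Nat.and_comm]
    exact pv_and_byte_mask k 8
  have h255 : (255 : Nat) &&& k = k % 256 := by
    rw [Nat.and_comm]; exact Nat.and_two_pow_sub_one_eq_mod k 8
  have h32 : (4294967295 : Nat) &&& k = k % 4294967296 := by
    rw [Nat.and_comm]; exact Nat.and_two_pow_sub_one_eq_mod k 32
  simp only [hb 0xFF000000 (by norm_num), hb 0x00FF0000 (by norm_num),
    hb 0x0000FF00 (by norm_num), hb 0x000000FF (by norm_num), hb 0xFFFFFFFF (by norm_num),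
    show Int.toNat 4278190080 = 4278190080 from rfl,
    show Int.toNat 16711680 = 16711680 from rfl, show Int.toNat 65280 = 65280 from rfl,
    show Int.toNat 255 = 255 from rfl, show Int.toNat 4294967295 = 4294967295 from rfl,
    h24, h16, h8, h255, h32, ← Int.natCast_shiftRight, Int.toNat_natCast,
    Nat.shiftLeft_eq, Nat.shiftRight_eq_div_pow]
  clear hb h24 h16 h8 h255 h32
  congr 1
  rw [pv_fold_chr]
  refine congrArg₂ List.cons ?_ (congrArg₂ List.cons ?_ (congrArg₂ List.cons ?_
    (congrArg₂ List.cons ?_ rfl))) <;> exact congrArg Char.ofNat (by omega)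

theorem decode_chunk_spec : Claim_equal_decode_chunk := by
  intro encoded hdom
  unfold Spec_decode_chunk
  have hdom' : -2147483648 ≤ encoded ∧ encoded ≤ 2147483648 := by
    simpa [Dom_decode_chunk, pvDomInt] using hdom
  rcases le_or_gt (0 : Int) encoded with hpos | hneg
  · obtain ⟨k, rfl, hkk⟩ : ∃ k : Nat, encoded = (k : Int) ∧ k ≤ 2147483648 :=
      ⟨encoded.toNat, by omega, by omega⟩
    exact pv_decode_pos k hkk
  · obtain ⟨k, rfl, hkk⟩ : ∃ k : Nat, encoded = -((k : Int) + 1) ∧ k ≤ 2147483647 :=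
      ⟨(-encoded - 1).toNat, by omega, by omega⟩
    exact pv_decode_neg k hkk
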